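-- pv_equiv track=rewrite | github.com/snickerz99m/BoomSQL | core/sql_injection_engine.py | apply_binary_search_optimization
-- ===== SOURCE A (Python) =====
-- from typing import Dict, List, Optional, Any, Tuple
--
-- def apply_binary_search_optimization(payload: str, target_length: int) -> List[str]:
--     """Apply binary search optimization for blind SQL injection"""
--     optimized_payloads = []
--
--     # Binary search for length
--     low, high = 1, target_length
--     while low <= high:
--         mid = (low + high) // 2
--         length_payload = payload.replace('TARGET_LENGTH', str(mid))
--         optimized_payloads.append(length_payload)
--         # This would be used in conjunction with response analysis
--         low = mid + 1
--
--     return optimized_payloads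
-- ===== SOURCE B (Python) =====
-- def apply_binary_search_optimization(payload: str, target_length: int):
--     """Probe-length generation split in two: first compute the list of midpoints
--     by recursion over the shrinking interval, then render the payloads."""
--     def mids(low, high):
--         if low > high:
--             return []
--         m = (low + high) // 2
--         return [m] + mids(m + 1, high)
--     return [payload.replace('TARGET_LENGTH', str(m)) for m in mids(1, target_length)]
-- ===== Notes on version B (the rewrite author's own statement) =====
-- stated objective: alternative
-- what changed: Replaces the while-loop that appends rendered payloads to an accumulator with a pure recursive function computing the list of midpoint lengths over the shrinking interval, followed by a separate map that renders the payloads.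
import Mathlib
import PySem

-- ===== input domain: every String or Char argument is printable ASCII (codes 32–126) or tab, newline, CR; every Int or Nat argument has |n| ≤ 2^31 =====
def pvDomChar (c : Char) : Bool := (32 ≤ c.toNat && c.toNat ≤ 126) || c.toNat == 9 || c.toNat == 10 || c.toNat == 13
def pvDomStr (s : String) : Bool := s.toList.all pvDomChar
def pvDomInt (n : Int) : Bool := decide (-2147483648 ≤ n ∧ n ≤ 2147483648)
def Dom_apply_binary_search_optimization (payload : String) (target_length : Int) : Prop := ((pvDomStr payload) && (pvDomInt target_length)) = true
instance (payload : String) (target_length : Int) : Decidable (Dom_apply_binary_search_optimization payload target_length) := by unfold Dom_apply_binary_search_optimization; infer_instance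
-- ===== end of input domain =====

-- ===== PORT A =====
-- while low <= high: mid=(low+high)//2; append payload.replace(...); low = mid+1
def pvLoopA (payload : String) (high : Int) (low : Int) (acc : List String) : List String :=
  if h : low ≤ high then
    let mid := PySem.Int.floordiv (low + high) 2
    pvLoopA payload high (mid + 1)
      (acc ++ [PySem.Str.replace payload "TARGET_LENGTH" (PySem.Int.toStr mid)])
  else acc
termination_by (high + 1 - low).toNat
decreasing_by
  have hb := PySem.Int.floordiv_two_mid_bounds h
  omega

def apply_binary_search_optimization (payload : String) (target_length : Int) : List String :=
  pvLoopA payload target_length 1 []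

-- ===== PORT B =====
-- recursion over the shrinking interval: the list of midpoint lengths, then a map
def pvMids (low high : Int) : List Int :=
  if h : low ≤ high then
    let m := PySem.Int.floordiv (low + high) 2
    m :: pvMids (m + 1) high
  else []
termination_by (high + 1 - low).toNat
decreasing_by
  have hb := PySem.Int.floordiv_two_mid_bounds h
  omega

def apply_binary_search_optimization_alt (payload : String) (target_length : Int) : List String :=
  (pvMids 1 target_length).map
    (fun m => PySem.Str.replace payload "TARGET_LENGTH" (PySem.Int.toStr m))

-- ===== PRECONDITION & SPEC =====
def Spec_apply_binary_search_optimization (payload : String) (target_length : Int) (out : List String) : Prop := out = apply_binary_search_optimization_alt payload target_length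
instance (payload : String) (target_length : Int) (out : List String) : Decidable (Spec_apply_binary_search_optimization payload target_length out) := by unfold Spec_apply_binary_search_optimization; infer_instance

-- ===== CLAIM (what is proved, stated in full; the proofs are below) =====
def Claim_equal_apply_binary_search_optimization : Prop := ∀ (payload : String) (target_length : Int), Dom_apply_binary_search_optimization payload target_length → Spec_apply_binary_search_optimization payload target_length (apply_binary_search_optimization payload target_length)

-- ===== LEMMAS AND PROOFS =====

-- ===== VERDICT (by name: the statement is the Claim_ definition above) =====
theorem pvLoopA_eq (payload : String) (high : Int) :
    ∀ (n : Nat) (low : Int) (acc : List String), (high + 1 - low).toNat ≤ n →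
      pvLoopA payload high low acc =
        acc ++ (pvMids low high).map
          (fun m => PySem.Str.replace payload "TARGET_LENGTH" (PySem.Int.toStr m)) := by
  intro n
  induction n with
  | zero =>
    intro low acc hn
    have hlh : ¬ low ≤ high := by omega
    rw [pvLoopA, pvMids]
    simp [hlh]
  | succ k ih =>
    intro low acc hn
    by_cases hlh : low ≤ high
    · have hb := PySem.Int.floordiv_two_mid_bounds hlh
      rw [pvLoopA, pvMids]
      simp only [hlh, dif_pos]
      rw [ih _ _ (by omega)]
      simp
    · rw [pvLoopA, pvMids]
      simp [hlh]

theorem apply_binary_search_optimization_spec : Claim_equal_apply_binary_search_optimization := by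
  intro payload target_length _
  unfold Spec_apply_binary_search_optimization apply_binary_search_optimization
    apply_binary_search_optimization_alt
  rw [pvLoopA_eq payload target_length (target_length + 1 - 1).toNat 1 [] le_rfl]
  simp
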